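-- pv_equiv track=rewrite | github.com/frkl/trojai-fuzzing-vision | util/perm_inv_v2.py | minimize_affix
-- ===== SOURCE A (Python) =====
-- def minimize_affix(affix):
--     m={}
--     affix_min=[]
--     for x in affix:
--         if not x in m:
--             m[x]=len(m)
--
--         affix_min.append(m[x])
--
--     return tuple(affix_min)
-- ===== SOURCE B (Python) =====
-- def minimize_affix(affix):
--     # index of x = number of distinct elements strictly before x's first occurrence
--     return tuple(len(set(affix[:affix.index(x)])) for x in affix)
-- ===== Notes on version B (the rewrite author's own statement) =====
-- stated objective: alternative
-- what changed: Drops A's stateful dict-building loop entirely: each output index is computed independently as the count of distinct elements in the prefix before that value's first occurrence (affix.index + set on a slice), trading A's O(n) single pass for a stateless quadratic per-element formula.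
import Mathlib
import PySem

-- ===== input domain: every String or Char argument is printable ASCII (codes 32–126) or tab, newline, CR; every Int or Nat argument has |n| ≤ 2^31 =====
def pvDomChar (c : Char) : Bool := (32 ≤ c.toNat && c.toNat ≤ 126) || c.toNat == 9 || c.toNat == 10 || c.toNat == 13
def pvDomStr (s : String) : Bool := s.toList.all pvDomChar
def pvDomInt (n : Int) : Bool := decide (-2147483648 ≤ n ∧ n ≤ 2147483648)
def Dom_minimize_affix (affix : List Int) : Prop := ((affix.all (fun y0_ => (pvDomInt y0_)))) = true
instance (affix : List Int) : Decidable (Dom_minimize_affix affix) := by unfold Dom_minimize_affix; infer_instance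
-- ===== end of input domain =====

-- B drops A's stateful dict loop: each index is the distinct-count of the prefix before the value's first occurrence; alternative formulation, quadratic but stateless.

-- ===== PORT A =====
-- one loop iteration of A: maybe-extend the dict, then append m[x] (present by construction, so getD 0 is exact)
def pvStepA (st : PySem.Dict Int Int × List Int) (x : Int) : PySem.Dict Int Int × List Int :=
  let m := if st.1.contains x then st.1 else st.1.insert x ((st.1.size : Int))
  (m, st.2 ++ [m.getD x 0])

def minimize_affix (affix : List Int) : List Int :=
  (affix.foldl pvStepA (PySem.Dict.empty, [])).2

-- ===== PORT B =====
-- len(set(affix[:affix.index(x)])); x is drawn from affix so index() always succeeds (getD 0 is exact)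
def minimize_affix_alt (affix : List Int) : List Int :=
  affix.map (fun x =>
    PySem.Set.len (PySem.Set.ofList
      (PySem.List.slice affix none (some (((PySem.List.index? affix x).getD 0 : Nat) : Int)))))

-- ===== PRECONDITION & SPEC =====
def Spec_minimize_affix (affix : List Int) (out : List Int) : Prop := out = minimize_affix_alt affix
instance (affix : List Int) (out : List Int) : Decidable (Spec_minimize_affix affix out) := by unfold Spec_minimize_affix; infer_instance

-- ===== CLAIM (what is proved, stated in full; the proofs are below) =====
def Claim_equal_minimize_affix : Prop := ∀ (affix : List Int), Dom_minimize_affix affix → Spec_minimize_affix affix (minimize_affix affix)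

-- ===== LEMMAS AND PROOFS =====

theorem pvNodupApp (s : List Int) (y : Int) (hs : s.Nodup) (hy : y ∉ s) :
    (s ++ [y]).Nodup := by
  rw [List.nodup_append]
  refine ⟨hs, List.nodup_singleton y, ?_⟩
  intro a ha b hb
  simp only [List.mem_singleton] at hb
  intro h; exact hy ((hb ▸ h ▸ ha : y ∈ s))

-- the dict A carries after having seen exactly the distinct elements s (in order)
def pvMkD (s : List Int) : PySem.Dict Int Int :=
  PySem.Dict.mk (s.zipIdx.map (fun p => (p.1, (p.2 : Int))))

theorem pvMkD_keys (s : List Int) : (pvMkD s).keys = s := by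
  simp [pvMkD, PySem.Dict.keys, Function.comp_def]

theorem pvMkD_contains (s : List Int) (x : Int) : (pvMkD s).contains x = s.contains x := by
  rw [PySem.Dict.contains_eq_decide_mem_keys, pvMkD_keys]
  simp

theorem pvMkD_size (s : List Int) : (pvMkD s).size = s.length := by
  simp [pvMkD, PySem.Dict.size]

theorem pvMkD_insert (s : List Int) (x : Int) (h : x ∉ s) :
    (pvMkD s).insert x ((s.length : Int)) = pvMkD (s ++ [x]) := by
  apply PySem.Dict.ext
  rw [PySem.Dict.items_insert_of_not_contains]
  · simp [pvMkD, List.zipIdx_append]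
  · rw [pvMkD_contains]; simp [h]

theorem pvMkD_getD (s : List Int) (x : Int) (hs : s.Nodup) (hx : x ∈ s) :
    (pvMkD s).getD x 0 = ((s.idxOf x : Nat) : Int) := by
  apply PySem.Dict.getD_of_mem_items
  · have hlt : s.idxOf x < s.length := List.idxOf_lt_length_of_mem hx
    have hget : s[s.idxOf x] = x := List.getElem_idxOf hlt
    simp only [pvMkD, List.mem_map]
    refine ⟨(x, s.idxOf x), ?_, rfl⟩
    rw [← hget]
    exact List.mem_zipIdx_iff_getElem?.mpr (by simp [List.getElem?_eq_getElem hlt])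
  · rw [pvMkD_keys]; exact hs

theorem pvMkD_nil : pvMkD [] = PySem.Dict.empty := rfl

-- idxOf is stable under Set.update extension, for elements already present
theorem pv_idxOf_update (s : List Int) (l : List Int) (x : Int) (hx : x ∈ s) :
    (PySem.Set.update s l).idxOf x = s.idxOf x := by
  induction l generalizing s with
  | nil => rfl
  | cons y r ih =>
    show (PySem.Set.update (PySem.Set.add s y) r).idxOf x = _
    by_cases hy : y ∈ s
    · rw [show PySem.Set.add s y = s from by simp [PySem.Set.add, hy]]
      exact ih s hx
    · rw [show PySem.Set.add s y = s ++ [y] from by simp [PySem.Set.add, hy]]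
      rw [ih (s ++ [y]) (by simp [hx])]
      exact List.idxOf_append_of_mem hx

-- A's loop, characterised: dict = pvMkD (update s rest), output = indices into the final distinct list
theorem pvLoopA (rest : List Int) : ∀ (s acc : List Int), s.Nodup →
    (rest.foldl pvStepA (pvMkD s, acc)).2
      = acc ++ rest.map (fun x => (((PySem.Set.update s rest).idxOf x : Nat) : Int)) := by
  induction rest with
  | nil => intro s acc _; simp
  | cons x r ih =>
    intro s acc hs
    simp only [List.foldl_cons]
    by_cases hx : x ∈ s
    · have hc : (pvMkD s).contains x = true := by
        rw [pvMkD_contains]; simp [hx]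
      have hstep : pvStepA (pvMkD s, acc) x
          = (pvMkD s, acc ++ [((s.idxOf x : Nat) : Int)]) := by
        simp [pvStepA, hc, pvMkD_getD s x hs hx]
      rw [hstep, ih s _ hs]
      have hupd : PySem.Set.update s (x :: r) = PySem.Set.update s r := by
        show PySem.Set.update (PySem.Set.add s x) r = _
        congr 1
        simp [PySem.Set.add, hx]
      rw [hupd]
      have hidx : (PySem.Set.update s r).idxOf x = s.idxOf x :=
        pv_idxOf_update s r x hx
      simp [hidx]
    · have hc : (pvMkD s).contains x = false := by
        rw [pvMkD_contains]; simp [hx]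
      have hs' : (s ++ [x]).Nodup := pvNodupApp s x hs hx
      have hmem : x ∈ s ++ [x] := by simp
      have hstep : pvStepA (pvMkD s, acc) x
          = (pvMkD (s ++ [x]), acc ++ [(((s ++ [x]).idxOf x : Nat) : Int)]) := by
        have hgd : (pvMkD (s ++ [x])).getD x 0 = ((s.length : Nat) : Int) := by
          rw [pvMkD_getD (s ++ [x]) x hs' hmem, List.idxOf_append]
          simp [hx]
        simp [pvStepA, hc, pvMkD_size, pvMkD_insert s x hx, hgd,
          List.idxOf_append, hx]
      rw [hstep, ih (s ++ [x]) _ hs']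
      have hupd : PySem.Set.update s (x :: r) = PySem.Set.update (s ++ [x]) r := by
        show PySem.Set.update (PySem.Set.add s x) r = _
        congr 1
        simp [PySem.Set.add, hx]
      rw [hupd]
      have hidx : (PySem.Set.update (s ++ [x]) r).idxOf x = (s ++ [x]).idxOf x :=
        pv_idxOf_update (s ++ [x]) r x hmem
      simp [hidx]

-- splitting ofList at an append
theorem pvOfList_append (a b : List Int) :
    PySem.Set.ofList (a ++ b) = PySem.Set.update (PySem.Set.ofList a) b := by
  simp [PySem.Set.ofList_eq_foldl, PySem.Set.update, List.foldl_append]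

-- per-element agreement: the index into the distinct list equals the distinct-count of the prefix before the first occurrence
theorem pvKey (affix : List Int) (x : Int) (hx : x ∈ affix) :
    ((PySem.Set.ofList affix).idxOf x : Int)
      = PySem.Set.len (PySem.Set.ofList
          (PySem.List.slice affix none (some (((PySem.List.index? affix x).getD 0 : Nat) : Int)))) := by
  obtain ⟨k, hk⟩ := Option.isSome_iff_exists.mp ((PySem.List.index?_isSome_iff affix x).mpr hx)
  obtain ⟨pre, suf, heq, hlen, hpre⟩ := (PySem.List.index?_eq_some_iff affix x k).mp hk
  have hxnp : x ∉ PySem.Set.ofList pre := by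
    intro h; exact hpre ((PySem.Set.mem_ofList pre x).mp h)
  have hslice : PySem.List.slice affix none (some (((PySem.List.index? affix x).getD 0 : Nat) : Int)) = pre := by
    rw [hk]
    show PySem.List.slice affix none (some ((k : Nat) : Int)) = pre
    rw [PySem.List.slice_to_natCast, heq, ← hlen, List.take_left]
  rw [hslice]
  have h1 : PySem.Set.ofList affix
      = PySem.Set.update ((PySem.Set.ofList pre : List Int) ++ [x]) suf := by
    rw [heq, pvOfList_append]
    show PySem.Set.update (PySem.Set.update (PySem.Set.ofList pre) [x]) suf = _
    congr 1
    show PySem.Set.add (PySem.Set.ofList pre) x = _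
    simp [PySem.Set.add, hxnp]
  rw [h1, pv_idxOf_update _ suf x (by simp), List.idxOf_append]
  simp [hxnp, PySem.Set.len]

-- ===== VERDICT (by name: the statement is the Claim_ definition above) =====
theorem minimize_affix_spec : Claim_equal_minimize_affix := by
  intro affix _
  show minimize_affix affix = minimize_affix_alt affix
  unfold minimize_affix minimize_affix_alt
  rw [← pvMkD_nil, pvLoopA affix [] [] List.nodup_nil, List.nil_append]
  apply List.map_congr_left
  intro x hx
  have : PySem.Set.update ([] : List Int) affix = PySem.Set.ofList affix := by
    simp [PySem.Set.ofList_eq_foldl, PySem.Set.update]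
  rw [this]
  exact pvKey affix x hx
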